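-- pv_equiv track=rewrite | github.com/ChanMeng666/juejin-algorithm-practice | juejin21.py | solution
-- ===== SOURCE A (Python) =====
-- def solution(n: int, a: list) -> int:
--     # PLEASE DO NOT MODIFY THE FUNCTION SIGNATURE
--
--     def dist(i, j):
--         # 计算两个数的贡献值：(a_i + a_j) * dist(i, j)
--         # dist(i, j) 是环形数组中两个位置的最短距离
--         distance = min((i - j) % n, (j - i) % n)
--         return (a[i] + a[j]) * distance
--
--     max_contribution = 0
--
--     # 遍历所有可能的数对
--     for i in range(n):
--         for j in range(i + 1, n):
--             contribution = dist(i, j)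
--             max_contribution = max(max_contribution, contribution)
--
--     return max_contribution
-- ===== SOURCE B (Python) =====
-- def solution(n: int, a: list) -> int:
--     best = 0
--     for d in range(1, n // 2 + 1):
--         for i in range(n):
--             best = max(best, (a[i] + a[(i + d) % n]) * d)
--     return best
-- ===== Notes on version B (the rewrite author's own statement) =====
-- stated objective: alternative
-- what changed: B makes the circular distance d = 1..n//2 the explicit outer loop variable and pairs each start index i with (i+d)%n, so the per-pair min-of-two-mods distance computation of A's all-pairs scan disappears.
import Mathlib
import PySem

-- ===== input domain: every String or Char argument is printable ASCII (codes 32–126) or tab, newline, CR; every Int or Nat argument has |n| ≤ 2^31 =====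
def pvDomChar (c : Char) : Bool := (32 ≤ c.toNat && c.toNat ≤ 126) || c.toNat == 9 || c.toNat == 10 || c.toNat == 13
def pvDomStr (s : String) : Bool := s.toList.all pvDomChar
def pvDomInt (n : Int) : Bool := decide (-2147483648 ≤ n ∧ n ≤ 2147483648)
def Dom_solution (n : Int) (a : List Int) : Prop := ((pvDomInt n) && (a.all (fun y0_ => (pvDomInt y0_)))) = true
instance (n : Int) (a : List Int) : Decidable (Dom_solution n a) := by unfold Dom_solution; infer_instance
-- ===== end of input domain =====

-- B replaces A's scan over all index pairs (with a per-pair min-of-two-mods circular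
-- distance) by an outer loop over the circular distance d = 1 .. n//2 that pairs each
-- start index i with (i+d)%n — an alternative decomposition of the same maximum.

-- ===== PORT A =====
-- dist(i, j) = (a[i] + a[j]) * min((i-j) % n, (j-i) % n)
def pvDistA (n : Int) (a : List Int) (i j : Int) : Int :=
  (PySem.List.pyGetD a i 0 + PySem.List.pyGetD a j 0) *
    min (PySem.Int.mod (i - j) n) (PySem.Int.mod (j - i) n)

def solution (n : Int) (a : List Int) : Int :=
  (PySem.List.pyRange 0 n 1).foldl (fun m i =>
    (PySem.List.pyRange (i + 1) n 1).foldl (fun m2 j =>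
      max m2 (pvDistA n a i j)) m) 0

-- ===== PORT B =====
-- contribution of start i at circular distance d: (a[i] + a[(i+d) % n]) * d
def pvContribB (n : Int) (a : List Int) (d i : Int) : Int :=
  (PySem.List.pyGetD a i 0 + PySem.List.pyGetD a (PySem.Int.mod (i + d) n) 0) * d

def solution_alt (n : Int) (a : List Int) : Int :=
  (PySem.List.pyRange 1 (PySem.Int.floordiv n 2 + 1) 1).foldl (fun m d =>
    (PySem.List.pyRange 0 n 1).foldl (fun m2 i =>
      max m2 (pvContribB n a d i)) m) 0

-- ===== PRECONDITION & SPEC =====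
-- For n ≥ 2 both Pythons index a[k] for every k < n and raise IndexError when n > len(a);
-- those raising inputs are excluded (for n ≤ 1 no element is touched and A returns 0).
def Pre_solution (n : Int) (a : List Int) : Prop := n ≤ 1 ∨ n ≤ (a.length : Int)
instance (n : Int) (a : List Int) : Decidable (Pre_solution n a) := by unfold Pre_solution; infer_instance

def pvWitness_solution : Int × List Int := (4, [3, -1, 2, 5])

def Spec_solution (n : Int) (a : List Int) (out : Int) : Prop := out = solution_alt n a
instance (n : Int) (a : List Int) (out : Int) : Decidable (Spec_solution n a out) := by unfold Spec_solution; infer_instance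

-- ===== CLAIM (what is proved, stated in full; the proofs are below) =====
def Claim_equal_solution : Prop := ∀ (n : Int) (a : List Int), Dom_solution n a → Pre_solution n a → Spec_solution n a (solution n a)

-- ===== LEMMAS AND PROOFS =====

-- generic facts about the nested max-fold shape shared by the two ports
def pvMax2 (outer : List Int) (inner : Int → List Int) (v : Int → Int → Int) (init : Int) : Int :=
  outer.foldl (fun m x => (inner x).foldl (fun m2 y => max m2 (v x y)) m) init

theorem pvFold1_init_le (L : List Int) (g : Int → Int) (init : Int) :
    init ≤ L.foldl (fun m y => max m (g y)) init := by
  induction L generalizing init with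
  | nil => simp
  | cons x xs ih => exact le_trans (le_max_left _ _) (ih (max init (g x)))

theorem pvFold1_le_of_mem (L : List Int) (g : Int → Int) (init : Int) {y : Int} (hy : y ∈ L) :
    g y ≤ L.foldl (fun m y => max m (g y)) init := by
  induction L generalizing init with
  | nil => cases hy
  | cons x xs ih =>
    rcases List.mem_cons.mp hy with h | h
    · subst h; exact le_trans (le_max_right _ _) (pvFold1_init_le xs g _)
    · exact ih (max init (g x)) h

theorem pvFold1_cases (L : List Int) (g : Int → Int) (init : Int) :
    L.foldl (fun m y => max m (g y)) init = init ∨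
      ∃ y ∈ L, L.foldl (fun m y => max m (g y)) init = g y := by
  induction L generalizing init with
  | nil => left; rfl
  | cons x xs ih =>
    rcases ih (max init (g x)) with h | ⟨y, hy, h⟩
    · rcases max_choice init (g x) with hm | hm
      · left; simpa [hm] using h
      · right; exact ⟨x, List.mem_cons_self, by simpa [hm] using h⟩
    · right; exact ⟨y, List.mem_cons_of_mem _ hy, h⟩

theorem pvMax2_init_le (outer : List Int) (inner : Int → List Int) (v : Int → Int → Int) (init : Int) :
    init ≤ pvMax2 outer inner v init := by
  induction outer generalizing init with
  | nil => simp [pvMax2]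
  | cons x xs ih =>
    exact le_trans (pvFold1_init_le (inner x) (v x) init) (ih _)

theorem pvMax2_le_of_mem (outer : List Int) (inner : Int → List Int) (v : Int → Int → Int)
    (init : Int) {x y : Int} (hx : x ∈ outer) (hy : y ∈ inner x) :
    v x y ≤ pvMax2 outer inner v init := by
  induction outer generalizing init with
  | nil => cases hx
  | cons z zs ih =>
    rcases List.mem_cons.mp hx with h | h
    · subst h
      exact le_trans (pvFold1_le_of_mem (inner x) (v x) init hy) (pvMax2_init_le zs inner v _)
    · exact ih ((inner z).foldl (fun m2 y => max m2 (v z y)) init) h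

theorem pvMax2_cases (outer : List Int) (inner : Int → List Int) (v : Int → Int → Int) (init : Int) :
    pvMax2 outer inner v init = init ∨
      ∃ x ∈ outer, ∃ y ∈ inner x, pvMax2 outer inner v init = v x y := by
  induction outer generalizing init with
  | nil => left; rfl
  | cons z zs ih =>
    rcases ih ((inner z).foldl (fun m2 y => max m2 (v z y)) init) with h | ⟨x, hx, y, hy, h⟩
    · rcases pvFold1_cases (inner z) (v z) init with h1 | ⟨y, hy, h1⟩
      · left; rw [pvMax2] at h ⊢; simp only [List.foldl_cons]; rw [h, h1]
      · right; refine ⟨z, List.mem_cons_self, y, hy, ?_⟩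
        rw [pvMax2] at h ⊢; simp only [List.foldl_cons]; rw [h, h1]
    · right; exact ⟨x, List.mem_cons_of_mem _ hx, y, hy, h⟩

-- the two ports as pvMax2 instances
theorem pvSolutionA_eq (n : Int) (a : List Int) :
    solution n a = pvMax2 (PySem.List.pyRange 0 n 1)
      (fun i => PySem.List.pyRange (i + 1) n 1) (pvDistA n a) 0 := rfl

theorem pvSolutionB_eq (n : Int) (a : List Int) :
    solution_alt n a = pvMax2 (PySem.List.pyRange 1 (PySem.Int.floordiv n 2 + 1) 1)
      (fun _ => PySem.List.pyRange 0 n 1) (pvContribB n a) 0 := rfl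

theorem pvEmod_eq_of_range {x n : Int} (h0 : 0 ≤ x) (h1 : x < n) : x % n = x :=
  Int.emod_eq_of_lt h0 h1

theorem pvEmod_add_cancel (x n : Int) : (x + n) % n = x % n := by
  have := Int.add_mul_emod_self_left (a := x) (b := n) (c := 1)
  simpa using this

theorem pvEmod_sub_cancel (x n : Int) : (x - n) % n = x % n := by
  have := pvEmod_add_cancel (x - n) n
  simpa using this

-- d ≤ n//2 ↔ 2d ≤ n
theorem pvHalf_iff (d n : Int) : d ≤ PySem.Int.floordiv n 2 ↔ d * 2 ≤ n :=
  PySem.Int.le_floordiv_iff_mul_le (by omega)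

-- every A-pair value is a B-contribution value (inside B's loop ranges)
theorem pvAB (n : Int) (a : List Int) {i j : Int} (h0 : 0 ≤ i) (hij : i < j) (hjn : j < n) :
    ∃ d, (1 ≤ d ∧ d < PySem.Int.floordiv n 2 + 1) ∧
      ∃ i', (0 ≤ i' ∧ i' < n) ∧ pvContribB n a d i' = pvDistA n a i j := by
  have hn : 0 < n := by omega
  have hmod1 : PySem.Int.mod (j - i) n = j - i := by
    rw [PySem.Int.mod_eq_emod_of_pos hn]; exact pvEmod_eq_of_range (by omega) (by omega)
  have hmod2 : PySem.Int.mod (i - j) n = n - (j - i) := by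
    rw [PySem.Int.mod_eq_emod_of_pos hn]
    have : i - j + n = n - (j - i) := by ring
    rw [← pvEmod_add_cancel (i - j) n, this]
    exact pvEmod_eq_of_range (by omega) (by omega)
  by_cases hc : j - i ≤ n - (j - i)
  · refine ⟨j - i, ⟨by omega, by have := (pvHalf_iff (j - i) n).mpr (by omega); omega⟩,
      i, ⟨h0, by omega⟩, ?_⟩
    have hm : PySem.Int.mod (i + (j - i)) n = j := by
      rw [PySem.Int.mod_eq_emod_of_pos hn]
      have : i + (j - i) = j := by ring
      rw [this]; exact pvEmod_eq_of_range (by omega) hjn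
    rw [pvContribB, pvDistA, hm, hmod1, hmod2]
    rw [min_eq_right (by omega)]
  · refine ⟨n - (j - i), ⟨by omega, by have := (pvHalf_iff (n - (j - i)) n).mpr (by omega); omega⟩,
      j, ⟨by omega, hjn⟩, ?_⟩
    have hm : PySem.Int.mod (j + (n - (j - i))) n = i := by
      rw [PySem.Int.mod_eq_emod_of_pos hn]
      have : j + (n - (j - i)) = i + n := by ring
      rw [this, pvEmod_add_cancel]
      exact pvEmod_eq_of_range h0 (by omega)
    rw [pvContribB, pvDistA, hm, hmod1, hmod2]
    rw [min_eq_left (by omega)]; ring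

-- every B-contribution value is an A-pair value (inside A's loop ranges)
theorem pvBA (n : Int) (a : List Int) {d i : Int} (hd1 : 1 ≤ d)
    (hd2 : d < PySem.Int.floordiv n 2 + 1) (h0 : 0 ≤ i) (hin : i < n) :
    ∃ p, (0 ≤ p ∧ p < n) ∧ ∃ q, (p + 1 ≤ q ∧ q < n) ∧ pvDistA n a p q = pvContribB n a d i := by
  have hn : 0 < n := by omega
  have hdn : d * 2 ≤ n := (pvHalf_iff d n).mp (by omega)
  by_cases hc : i + d < n
  · -- j = i + d, i < j
    have hm : PySem.Int.mod (i + d) n = i + d := by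
      rw [PySem.Int.mod_eq_emod_of_pos hn]; exact pvEmod_eq_of_range (by omega) hc
    refine ⟨i, ⟨h0, hin⟩, i + d, ⟨by omega, hc⟩, ?_⟩
    have h1 : PySem.Int.mod (i + d - i) n = d := by
      rw [PySem.Int.mod_eq_emod_of_pos hn]
      have : i + d - i = d := by ring
      rw [this]; exact pvEmod_eq_of_range (by omega) (by omega)
    have h2 : PySem.Int.mod (i - (i + d)) n = n - d := by
      rw [PySem.Int.mod_eq_emod_of_pos hn]
      have : i - (i + d) = n - d - n := by ring
      rw [this, pvEmod_sub_cancel]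
      exact pvEmod_eq_of_range (by omega) (by omega)
    rw [pvDistA, pvContribB, hm, h1, h2, min_eq_right (by omega)]
  · -- j = i + d - n < i
    have hm : PySem.Int.mod (i + d) n = i + d - n := by
      rw [PySem.Int.mod_eq_emod_of_pos hn]
      rw [← pvEmod_sub_cancel (i + d) n]
      exact pvEmod_eq_of_range (by omega) (by omega)
    have hlt : i + d - n < i := by omega
    refine ⟨i + d - n, ⟨by omega, by omega⟩, i, ⟨by omega, hin⟩, ?_⟩
    have h1 : PySem.Int.mod (i + d - n - i) n = d := by
      rw [PySem.Int.mod_eq_emod_of_pos hn]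
      have : i + d - n - i = d - n := by ring
      rw [this, pvEmod_sub_cancel]
      exact pvEmod_eq_of_range (by omega) (by omega)
    have h2 : PySem.Int.mod (i - (i + d - n)) n = n - d := by
      rw [PySem.Int.mod_eq_emod_of_pos hn]
      have : i - (i + d - n) = n - d := by ring
      rw [this]; exact pvEmod_eq_of_range (by omega) (by omega)
    rw [pvDistA, pvContribB, hm, h1, h2, min_eq_left (by omega)]; ring

-- ===== VERDICT (by name: the statement is the Claim_ definition above) =====
theorem solution_spec : Claim_equal_solution := by
  intro n a _hdom _hpre
  unfold Spec_solution
  rw [pvSolutionA_eq, pvSolutionB_eq]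
  apply le_antisymm
  · rcases pvMax2_cases (PySem.List.pyRange 0 n 1)
      (fun i => PySem.List.pyRange (i + 1) n 1) (pvDistA n a) 0 with h | ⟨i, hi, j, hj, h⟩
    · rw [h]; exact pvMax2_init_le _ _ _ _
    · rw [h]
      rcases PySem.List.mem_pyRange_one.mp hi with ⟨hi0, hin⟩
      rcases PySem.List.mem_pyRange_one.mp hj with ⟨hj0, hjn⟩
      obtain ⟨d, ⟨hd1, hd2⟩, i', ⟨hi'0, hi'n⟩, heq⟩ := pvAB n a hi0 (by omega) hjn
      rw [← heq]
      exact pvMax2_le_of_mem _ _ _ _ (PySem.List.mem_pyRange_one.mpr ⟨hd1, hd2⟩)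
        (PySem.List.mem_pyRange_one.mpr ⟨hi'0, hi'n⟩)
  · rcases pvMax2_cases (PySem.List.pyRange 1 (PySem.Int.floordiv n 2 + 1) 1)
      (fun _ => PySem.List.pyRange 0 n 1) (pvContribB n a) 0 with h | ⟨d, hd, i, hi, h⟩
    · rw [h]; exact pvMax2_init_le _ _ _ _
    · rw [h]
      rcases PySem.List.mem_pyRange_one.mp hd with ⟨hd1, hd2⟩
      rcases PySem.List.mem_pyRange_one.mp hi with ⟨hi0, hin⟩
      obtain ⟨p, ⟨hp0, hpn⟩, q, ⟨hpq, hqn⟩, heq⟩ := pvBA n a hd1 hd2 hi0 hin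
      rw [← heq]
      exact pvMax2_le_of_mem _ _ _ _ (PySem.List.mem_pyRange_one.mpr ⟨hp0, hpn⟩)
        (PySem.List.mem_pyRange_one.mpr ⟨hpq, hqn⟩)
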